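-- pv_equiv track=rewrite | github.com/fogonz/SalesManagementApplication | devTools/insertProducts.py | construir_tipo_producto
-- ===== SOURCE A (Python) =====
-- def construir_tipo_producto(nombre, largo, ancho):
--     """
--     Construye el tipo de producto concatenando nombre, largo y ancho
--     """
--     # Limpiar valores None o vacíos
--     nombre = str(nombre).strip() if nombre else ""
--     largo = str(largo).strip() if largo else ""
--     ancho = str(ancho).strip() if ancho else ""
--
--     # Construir tipo_producto eliminando espacios extra
--     tipo_producto = f"{nombre} {largo} {ancho}".strip()
--
--     # Limpiar espacios múltiples
--     while "  " in tipo_producto: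
--         tipo_producto = tipo_producto.replace("  ", " ")
--
--     return tipo_producto
-- ===== SOURCE B (Python) =====
-- def construir_tipo_producto(nombre, largo, ancho):
--     """
--     Construye el tipo de producto concatenando nombre, largo y ancho
--     """
--     nombre = str(nombre).strip() if nombre else ""
--     largo = str(largo).strip() if largo else ""
--     ancho = str(ancho).strip() if ancho else ""
--
--     # One pass: split on the literal space, drop the empty chunks that
--     # consecutive spaces produce, rejoin with a single space.
--     return " ".join(filter(None, f"{nombre} {largo} {ancho}".strip().split(" ")))
-- ===== Notes on version B (the rewrite author's own statement) =====
-- stated objective: simpler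
-- what changed: The fixed-point while-loop that repeatedly rescans and rewrites the whole string replacing double spaces is replaced by a single split-on-space / drop-empty-chunks / rejoin pass.
import Mathlib
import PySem

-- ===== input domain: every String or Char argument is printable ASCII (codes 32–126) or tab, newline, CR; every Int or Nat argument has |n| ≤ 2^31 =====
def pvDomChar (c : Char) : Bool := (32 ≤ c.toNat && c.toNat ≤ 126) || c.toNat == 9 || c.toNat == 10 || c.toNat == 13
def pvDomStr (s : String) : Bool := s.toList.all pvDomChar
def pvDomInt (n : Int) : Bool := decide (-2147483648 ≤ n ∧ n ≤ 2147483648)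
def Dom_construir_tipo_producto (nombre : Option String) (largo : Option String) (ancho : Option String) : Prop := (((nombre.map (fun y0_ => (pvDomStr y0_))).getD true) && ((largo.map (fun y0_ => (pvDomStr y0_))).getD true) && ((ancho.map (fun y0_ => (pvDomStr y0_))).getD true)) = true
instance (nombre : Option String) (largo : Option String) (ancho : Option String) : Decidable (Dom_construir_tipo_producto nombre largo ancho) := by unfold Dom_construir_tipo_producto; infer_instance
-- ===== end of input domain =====

-- B replaces A's "replace double spaces until none remain" while-loop by one
-- split(" ") / drop-empty-chunks / " ".join pass (objective: simpler one-pass cleanup).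

-- ===== PORT A =====
-- termination fact for A's while-loop (cited by the port's decreasing_by):
-- one replace("  ", " ") pass strictly shortens the string while "  " occurs in it
theorem pvReplaceGoLenLe (fuel : Nat) : ∀ (l acc : List Char),
    (PySem.Chars.replace.go [' ', ' '] [' '] fuel l acc).length ≤ acc.length + l.length := by
  induction fuel with
  | zero => intro l acc; rw [PySem.Chars.replace.go.eq_def]; simp
  | succ n ih =>
    intro l acc
    rw [PySem.Chars.replace.go.eq_def]
    cases l with
    | nil => simp
    | cons c t =>
      dsimp only
      by_cases hp : List.isPrefixOf [' ', ' '] (c :: t) = true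
      · simp only [hp, if_true]
        have h2 : ∃ t', t = ' ' :: t' ∧ c = ' ' := by
          cases t with
          | nil => simp [List.isPrefixOf] at hp
          | cons d t' =>
            simp [List.isPrefixOf] at hp
            exact ⟨t', by rw [← hp.2], hp.1.symm⟩
        obtain ⟨t', rfl, rfl⟩ := h2
        calc (PySem.Chars.replace.go [' ', ' '] [' '] n (List.drop 2 (' ' :: ' ' :: t')) ([' '].reverse ++ acc)).length
            ≤ ([' '].reverse ++ acc).length + (List.drop 2 (' ' :: ' ' :: t')).length := ih _ _
          _ ≤ acc.length + (' ' :: ' ' :: t').length := by simp; omega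
      · simp only [hp, if_false]
        calc (PySem.Chars.replace.go [' ', ' '] [' '] n t (c :: acc)).length
            ≤ (c :: acc).length + t.length := ih _ _
          _ ≤ acc.length + (c :: t).length := by simp; omega

theorem pvReplaceGoLenLt (fuel : Nat) : ∀ (l acc : List Char), l.length ≤ fuel →
    [' ', ' '] <:+: l →
    (PySem.Chars.replace.go [' ', ' '] [' '] fuel l acc).length < acc.length + l.length := by
  induction fuel with
  | zero =>
    intro l acc hf hinf
    exfalso
    have := hinf.length_le
    simp at this
    omega
  | succ n ih =>
    intro l acc hf hinf
    rw [PySem.Chars.replace.go.eq_def]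
    cases l with
    | nil => exfalso; have := hinf.length_le; simp at this
    | cons c t =>
      dsimp only
      by_cases hp : List.isPrefixOf [' ', ' '] (c :: t) = true
      · simp only [hp, if_true]
        have h2 : ∃ t', t = ' ' :: t' ∧ c = ' ' := by
          cases t with
          | nil => simp [List.isPrefixOf] at hp
          | cons d t' =>
            simp [List.isPrefixOf] at hp
            exact ⟨t', by rw [← hp.2], hp.1.symm⟩
        obtain ⟨t', rfl, rfl⟩ := h2
        calc (PySem.Chars.replace.go [' ', ' '] [' '] n (List.drop 2 (' ' :: ' ' :: t')) ([' '].reverse ++ acc)).length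
            ≤ ([' '].reverse ++ acc).length + (List.drop 2 (' ' :: ' ' :: t')).length := pvReplaceGoLenLe _ _ _
          _ < acc.length + (' ' :: ' ' :: t').length := by simp; omega
      · simp only [hp, if_false]
        have hinf' : [' ', ' '] <:+: t := by
          rcases (List.infix_cons_iff.mp hinf) with hpre | hin
          · exact absurd (List.isPrefixOf_iff_prefix.mpr hpre) hp
          · exact hin
        calc (PySem.Chars.replace.go [' ', ' '] [' '] n t (c :: acc)).length
            < (c :: acc).length + t.length := ih _ _ (by simp at hf; omega) hinf'
          _ ≤ acc.length + (c :: t).length := by simp; omega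

theorem pvReplaceLenLt (s : String) (h : PySem.Str.isIn "  " s = true) :
    (PySem.Str.replace s "  " " ").toList.length < s.toList.length := by
  have hinf : [' ', ' '] <:+: s.toList := by
    rw [PySem.Str.isIn_eq] at h
    have := (PySem.Chars.isIn_iff_infix (sub := "  ".toList) (s := s.toList)).mp h
    simpa using this
  rw [PySem.Str.toList_replace]
  show (PySem.Chars.replace s.toList "  ".toList " ".toList).length < s.toList.length
  have h1 : "  ".toList = [' ', ' '] := by decide
  have h2 : " ".toList = [' '] := by decide
  rw [h1, h2, PySem.Chars.replace]
  simp only [List.isEmpty_iff]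
  rw [if_neg (by simp)]
  have := pvReplaceGoLenLt s.toList.length s.toList [] le_rfl hinf
  simpa using this

-- Python truthiness cleanup: `str(x).strip() if x else ""` for x an Optional[str]
def pvClean (x : Option String) : String :=
  match x with
  | none => ""
  | some s => if s == "" then "" else PySem.Str.strip s

-- A's while-loop: `while "  " in tipo: tipo = tipo.replace("  ", " ")`
def pvCollapseA (s : String) : String :=
  if PySem.Str.isIn "  " s then pvCollapseA (PySem.Str.replace s "  " " ") else s
termination_by s.toList.length
decreasing_by exact pvReplaceLenLt s (by assumption)

def construir_tipo_producto (nombre : Option String) (largo : Option String) (ancho : Option String) : String :=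
  let nombre' := pvClean nombre
  let largo' := pvClean largo
  let ancho' := pvClean ancho
  -- f"{nombre} {largo} {ancho}".strip(); the f-string concat is exact on code points
  let tipo := PySem.Str.strip (String.ofList (nombre'.toList ++ ' ' :: largo'.toList ++ ' ' :: ancho'.toList))
  pvCollapseA tipo

-- ===== PORT B =====
def construir_tipo_producto_alt (nombre : Option String) (largo : Option String) (ancho : Option String) : String :=
  let nombre' := pvClean nombre
  let largo' := pvClean largo
  let ancho' := pvClean ancho
  let tipo := PySem.Str.strip (String.ofList (nombre'.toList ++ ' ' :: largo'.toList ++ ' ' :: ancho'.toList))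
  -- " ".join(filter(None, tipo.split(" ")))
  PySem.Str.join " " (((PySem.Str.split? tipo " ").getD []).filter (fun p => !(p == "")))

-- ===== PRECONDITION & SPEC =====
def Spec_construir_tipo_producto (nombre : Option String) (largo : Option String) (ancho : Option String) (out : String) : Prop := out = construir_tipo_producto_alt nombre largo ancho
instance (nombre : Option String) (largo : Option String) (ancho : Option String) (out : String) : Decidable (Spec_construir_tipo_producto nombre largo ancho out) := by unfold Spec_construir_tipo_producto; infer_instance

-- ===== CLAIM (what is proved, stated in full; the proofs are below) =====
def Claim_equal_construir_tipo_producto : Prop := ∀ (nombre : Option String) (largo : Option String) (ancho : Option String), Dom_construir_tipo_producto nombre largo ancho → Spec_construir_tipo_producto nombre largo ancho (construir_tipo_producto nombre largo ancho)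

-- ===== LEMMAS AND PROOFS =====

-- one replace("  ", " ") pass, as a clean recursion
def pvRep : List Char → List Char
  | [] => []
  | [c] => [c]
  | c :: d :: t => if c = ' ' ∧ d = ' ' then ' ' :: pvRep t else c :: pvRep (d :: t)
termination_by l => l.length

-- split(" "), as a clean recursion
def pvSp : List Char → List (List Char)
  | [] => [[]]
  | c :: t =>
    if c = ' ' then [] :: pvSp t
    else match pvSp t with
      | p :: ps => (c :: p) :: ps
      | [] => [[c]]

-- the space-separated words of a string
def pvWds : List Char → List (List Char)
  | [] => []
  | c :: t =>
    if c = ' ' then pvWds t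
    else (c :: t.takeWhile (· ≠ ' ')) :: pvWds (t.dropWhile (· ≠ ' '))
termination_by l => l.length
decreasing_by
  · simp
  · have := List.length_dropWhile_le (fun x => !decide (x = ' ')) t
    simp; omega

@[simp] theorem pvRep_nil : pvRep [] = [] := by rw [pvRep]
@[simp] theorem pvRep_single (c : Char) : pvRep [c] = [c] := by rw [pvRep]
theorem pvRep_cons₂ (c d : Char) (t : List Char) :
    pvRep (c :: d :: t) = if c = ' ' ∧ d = ' ' then ' ' :: pvRep t else c :: pvRep (d :: t) := by
  rw [pvRep]

theorem pvSpNeNil (cs : List Char) : pvSp cs ≠ [] := by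
  cases cs with
  | nil => simp [pvSp]
  | cons c t =>
    rw [pvSp]
    split
    · simp
    · split <;> simp

theorem pvRep_cons_of_ne (c : Char) (t : List Char) (h : ¬ (c = ' ' ∧ t.head? = some ' ')) :
    pvRep (c :: t) = c :: pvRep t := by
  cases t with
  | nil => simp
  | cons d t' =>
    rw [pvRep_cons₂, if_neg]
    intro ⟨h1, h2⟩
    exact h ⟨h1, by rw [h2]; rfl⟩

theorem pvReplaceGoEq (fuel : Nat) : ∀ (l acc : List Char), l.length ≤ fuel →
    PySem.Chars.replace.go [' ', ' '] [' '] fuel l acc = acc.reverse ++ pvRep l := by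
  induction fuel with
  | zero =>
    intro l acc h
    rw [PySem.Chars.replace.go.eq_def]
    have : l = [] := List.eq_nil_of_length_eq_zero (Nat.le_zero.mp h)
    subst this
    simp
  | succ n ih =>
    intro l acc h
    rw [PySem.Chars.replace.go.eq_def]
    cases l with
    | nil => simp
    | cons c t =>
      dsimp only
      by_cases hp : List.isPrefixOf [' ', ' '] (c :: t) = true
      · simp only [hp, if_true]
        obtain ⟨t', rfl, rfl⟩ : ∃ t', t = ' ' :: t' ∧ c = ' ' := by
          cases t with
          | nil => simp [List.isPrefixOf] at hp
          | cons d t'' =>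
            simp [List.isPrefixOf] at hp
            exact ⟨t'', by rw [← hp.2], hp.1.symm⟩
        rw [show List.drop [' ', ' '].length (' ' :: ' ' :: t') = t' from rfl]
        rw [ih _ _ (by simp at h ⊢; omega)]
        rw [pvRep_cons₂, if_pos ⟨rfl, rfl⟩]
        simp
      · simp only [hp, if_false]
        have hlen : t.length ≤ n := by simp at h; omega
        have hne : ¬ (c = ' ' ∧ t.head? = some ' ') := by
          intro ⟨h1, h2⟩
          apply hp
          cases t with
          | nil => simp at h2
          | cons d t'' =>
            simp at h2
            simp [List.isPrefixOf, h1, h2]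
        rw [ih t (c :: acc) hlen, pvRep_cons_of_ne c t hne]
        simp

theorem pvReplaceEqRep (s : String) :
    (PySem.Str.replace s "  " " ").toList = pvRep s.toList := by
  rw [PySem.Str.toList_replace]
  show PySem.Chars.replace s.toList "  ".toList " ".toList = pvRep s.toList
  rw [show "  ".toList = [' ', ' '] from rfl, show " ".toList = [' '] from rfl]
  rw [PySem.Chars.replace, if_neg (by simp)]
  rw [pvReplaceGoEq _ _ _ le_rfl]
  simp

theorem pvSpGoEq (fuel : Nat) : ∀ (l cur : List Char) (acc : List (List Char)), l.length < fuel →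
    PySem.Chars.splitOn.go [' '] fuel l cur acc =
      acc.reverse ++ (match pvSp l with
        | p :: ps => (cur.reverse ++ p) :: ps
        | [] => [cur.reverse]) := by
  induction fuel with
  | zero => intro l cur acc h; omega
  | succ n ih =>
    intro l cur acc h
    rw [PySem.Chars.splitOn.go.eq_def]
    cases l with
    | nil => simp [pvSp]
    | cons c t =>
      dsimp only
      obtain ⟨p, ps, hsp⟩ : ∃ p ps, pvSp t = p :: ps := by
        cases hs : pvSp t with
        | nil => exact absurd hs (pvSpNeNil t)
        | cons p ps => exact ⟨p, ps, rfl⟩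
      by_cases hc : c = ' '
      · subst hc
        rw [if_pos (by simp [List.isPrefixOf])]
        rw [show List.drop [' '].length (' ' :: t) = t from rfl]
        rw [ih _ _ _ (by simp at h ⊢; omega)]
        rw [pvSp, if_pos rfl]
        simp [hsp]
      · rw [if_neg (by simp [List.isPrefixOf]; intro h'; exact absurd h'.symm hc)]
        rw [ih _ _ _ (by simp at h ⊢; omega)]
        rw [pvSp, if_neg hc]
        simp [hsp]

theorem pvSplitOnEqSp (cs : List Char) : PySem.Chars.splitOn cs [' '] = pvSp cs := by
  rw [PySem.Chars.splitOn]
  rw [pvSpGoEq _ _ _ _ (by omega)]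
  obtain ⟨p, ps, hsp⟩ : ∃ p ps, pvSp cs = p :: ps := by
    cases hs : pvSp cs with
    | nil => exact absurd hs (pvSpNeNil cs)
    | cons p ps => exact ⟨p, ps, rfl⟩
  simp [hsp]

def pvTail (cs : List Char) : List (List Char) :=
  match cs.dropWhile (· ≠ ' ') with
  | [] => []
  | _ :: r => pvSp r

theorem pvSpPair (cs : List Char) :
    pvSp cs = cs.takeWhile (· ≠ ' ') :: pvTail cs := by
  induction cs with
  | nil => simp [pvSp, pvTail]
  | cons c t ih =>
    by_cases hc : c = ' '
    · subst hc
      rw [pvSp, if_pos rfl, pvTail]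
      simp [List.takeWhile_cons, List.dropWhile_cons]
    · rw [pvSp, if_neg hc, ih]
      simp [pvTail, List.takeWhile_cons, List.dropWhile_cons, hc]

theorem pvFilterSpAux : ∀ (n : Nat), ∀ (cs : List Char), cs.length ≤ n →
    (pvSp cs).filter (· ≠ ([] : List Char)) = pvWds cs := by
  intro n
  induction n with
  | zero =>
    intro cs h
    have : cs = [] := List.eq_nil_of_length_eq_zero (Nat.le_zero.mp h)
    subst this
    simp [pvSp, pvWds]
  | succ n ih =>
    intro cs h
    cases cs with
    | nil => simp [pvSp, pvWds]
    | cons c t =>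
      by_cases hc : c = ' '
      · subst hc
        rw [pvSp, if_pos rfl, pvWds, if_pos rfl]
        rw [List.filter_cons]
        simp only [show (([] : List Char) ≠ ([] : List Char)) = False by simp, decide_false]
        exact ih t (by simp at h; omega)
      · rw [pvWds, if_neg hc, pvSpPair]
        have h1 : List.takeWhile (· ≠ ' ') (c :: t) = c :: List.takeWhile (· ≠ ' ') t := by
          simp [hc]
        rw [h1, List.filter_cons, if_pos (by simp)]
        congr 1
        · rw [pvTail]
          have h2 : List.dropWhile (· ≠ ' ') (c :: t) = List.dropWhile (· ≠ ' ') t := by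
            simp [hc]
          rw [h2]
          cases hd : t.dropWhile (· ≠ ' ') with
          | nil => simp [pvWds]
          | cons d r =>
            dsimp only
            have hds : d = ' ' := by
              have hne : t.dropWhile (· ≠ ' ') ≠ [] := by rw [hd]; simp
              have h3 := List.head_dropWhile_not (· ≠ ' ') hne
              have h4 : (t.dropWhile (· ≠ ' ')).head hne = d := by
                have h5 : (t.dropWhile (· ≠ ' ')).head? = some d := by rw [hd]; rfl
                exact Option.some.inj ((List.head?_eq_head hne).symm.trans h5)
              rw [h4] at h3
              simpa using h3
            have hlen : r.length ≤ n := by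
              have h2 := List.length_dropWhile_le (· ≠ ' ') t
              rw [hd] at h2
              simp at h2 h
              omega
            rw [ih r hlen]
            rw [pvWds, if_pos hds]

theorem pvFilterSp (cs : List Char) :
    (pvSp cs).filter (· ≠ ([] : List Char)) = pvWds cs := pvFilterSpAux cs.length cs le_rfl

theorem pvRepHead (cs : List Char) : (pvRep cs).head? = cs.head? := by
  match cs with
  | [] => simp
  | [c] => simp
  | c :: d :: t =>
    rw [pvRep_cons₂]
    split
    · rename_i hcd
      simp [hcd.1]
    · simp

theorem pvRepNeNil (cs : List Char) (h : cs ≠ []) : pvRep cs ≠ [] := by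
  intro h0
  have := pvRepHead cs
  rw [h0] at this
  cases cs with
  | nil => exact h rfl
  | cons c t => simp at this

theorem pvRepSplitAux : ∀ (n : Nat), ∀ (cs : List Char), cs.length ≤ n →
    pvRep cs = cs.takeWhile (· ≠ ' ') ++ pvRep (cs.dropWhile (· ≠ ' ')) := by
  intro n
  induction n with
  | zero =>
    intro cs h
    have : cs = [] := List.eq_nil_of_length_eq_zero (Nat.le_zero.mp h)
    subst this
    simp
  | succ n ih =>
    intro cs h
    cases cs with
    | nil => simp
    | cons c t =>
      by_cases hc : c = ' '
      · simp [List.takeWhile_cons, List.dropWhile_cons, hc]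
      · have hne : ¬ (c = ' ' ∧ t.head? = some ' ') := fun h0 => hc h0.1
        rw [pvRep_cons_of_ne c t hne]
        rw [ih t (by simp at h; omega)]
        simp [List.takeWhile_cons, List.dropWhile_cons, hc]

theorem pvRepSplit (cs : List Char) :
    pvRep cs = cs.takeWhile (· ≠ ' ') ++ pvRep (cs.dropWhile (· ≠ ' ')) :=
  pvRepSplitAux cs.length cs le_rfl

theorem pvWds_cons_space (t : List Char) : pvWds (' ' :: t) = pvWds t := by
  rw [pvWds, if_pos rfl]

theorem pvWds_cons_of_ne (c : Char) (t : List Char) (hc : c ≠ ' ') :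
    pvWds (c :: t) = (c :: t.takeWhile (· ≠ ' ')) :: pvWds (t.dropWhile (· ≠ ' ')) := by
  rw [pvWds, if_neg hc]

theorem pvRepSpacePrefix (r : List Char) : ∃ w, pvRep (' ' :: r) = ' ' :: w := by
  have h := pvRepHead (' ' :: r)
  cases hx : pvRep (' ' :: r) with
  | nil => rw [hx] at h; simp at h
  | cons a w =>
    rw [hx] at h
    simp at h
    exact ⟨w, by rw [h]⟩

theorem pvWdsRepAux : ∀ (n : Nat), ∀ (cs : List Char), cs.length ≤ n →
    pvWds (pvRep cs) = pvWds cs := by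
  intro n
  induction n with
  | zero =>
    intro cs h
    have : cs = [] := List.eq_nil_of_length_eq_zero (Nat.le_zero.mp h)
    subst this
    simp
  | succ n ih =>
    intro cs h
    match cs with
    | [] => simp
    | [c] => simp
    | c :: d :: t =>
      rw [pvRep_cons₂]
      split
      · rename_i hcd
        obtain ⟨rfl, rfl⟩ := hcd
        rw [pvWds_cons_space, pvWds_cons_space, pvWds_cons_space]
        exact ih t (by simp at h; omega)
      · rename_i hcd
        by_cases hc : c = ' '
        · subst hc
          rw [pvWds_cons_space, pvWds_cons_space]
          exact ih (d :: t) (by simp at h ⊢; omega)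
        · rw [pvWds_cons_of_ne c _ hc, pvWds_cons_of_ne c _ hc]
          have hu := pvRepSplit (d :: t)
          have hall : ∀ x ∈ (d :: t).takeWhile (· ≠ ' '), (fun x => decide (x ≠ ' ')) x = true := by
            intro x hx
            show decide (x ≠ ' ') = true
            exact List.mem_takeWhile_imp (p := fun x => decide (x ≠ ' ')) hx
          have htake0 : List.takeWhile (· ≠ ' ') (pvRep ((d :: t).dropWhile (· ≠ ' '))) = []
              ∧ List.dropWhile (· ≠ ' ') (pvRep ((d :: t).dropWhile (· ≠ ' '))) =
                  pvRep ((d :: t).dropWhile (· ≠ ' ')) := by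
            cases hdw : (d :: t).dropWhile (· ≠ ' ') with
            | nil => simp
            | cons e r =>
              have he : e = ' ' := by
                have hne : (d :: t).dropWhile (· ≠ ' ') ≠ [] := by rw [hdw]; simp
                have h3 := List.head_dropWhile_not (· ≠ ' ') hne
                have h5 : ((d :: t).dropWhile (· ≠ ' ')).head? = some e := by rw [hdw]; rfl
                have h4 := Option.some.inj ((List.head?_eq_head hne).symm.trans h5)
                rw [h4] at h3
                simpa using h3
              subst he
              obtain ⟨w, hw⟩ := pvRepSpacePrefix r
              rw [hw]
              constructor
              · rw [List.takeWhile_cons]; simp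
              · rw [List.dropWhile_cons]; simp
          congr 1
          · rw [hu, List.takeWhile_append_of_pos hall, htake0.1]
            simp
          · rw [hu, List.dropWhile_append_of_pos hall, htake0.2]
            have hlen : ((d :: t).dropWhile (· ≠ ' ')).length ≤ n := by
              have h2 := List.length_dropWhile_le (fun x => decide (x ≠ ' ')) (d :: t)
              simp at h2 h ⊢
              omega
            exact ih _ hlen

theorem pvWdsRep (cs : List Char) : pvWds (pvRep cs) = pvWds cs :=
  pvWdsRepAux cs.length cs le_rfl

theorem pvGetLastCons (a : Char) (l : List Char) (h : l ≠ []) :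
    (a :: l).getLast? = l.getLast? := by
  cases l with
  | nil => exact absurd rfl h
  | cons b m => rw [List.getLast?_cons_cons]

theorem pvRepLastAux : ∀ (n : Nat), ∀ (cs : List Char), cs.length ≤ n →
    cs.getLast? ≠ some ' ' → (pvRep cs).getLast? ≠ some ' ' := by
  intro n
  induction n with
  | zero =>
    intro cs hl h
    have : cs = [] := List.eq_nil_of_length_eq_zero (Nat.le_zero.mp hl)
    subst this
    simpa using h
  | succ n ih =>
    intro cs hl h
    match cs with
    | [] => simpa using h
    | [c] => simpa using h
    | c :: d :: t =>
      rw [pvRep_cons₂]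
      split
      · rename_i hcd
        obtain ⟨rfl, rfl⟩ := hcd
        cases t with
        | nil => simp at h
        | cons e t' =>
          have hne : pvRep (e :: t') ≠ [] := pvRepNeNil _ (by simp)
          rw [pvGetLastCons _ _ hne]
          apply ih _ (by simp at hl ⊢; omega)
          rw [List.getLast?_cons_cons, pvGetLastCons] at h
          · exact h
          · simp
      · have hne : pvRep (d :: t) ≠ [] := pvRepNeNil _ (by simp)
        rw [pvGetLastCons _ _ hne]
        apply ih _ (by simp at hl ⊢; omega)
        rw [List.getLast?_cons_cons] at h
        exact h

theorem pvRepLast (cs : List Char) (h : cs.getLast? ≠ some ' ') :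
    (pvRep cs).getLast? ≠ some ' ' := pvRepLastAux cs.length cs le_rfl h

theorem pvIntercalateCons (a : List Char) (l : List (List Char)) (h : l ≠ []) :
    [' '].intercalate (a :: l) = a ++ ' ' :: [' '].intercalate l := by
  cases l with
  | nil => exact absurd rfl h
  | cons b m => simp [List.intercalate, List.intersperse]

theorem pvTakeWhileIdem (t x : List Char) :
    List.takeWhile (fun c => !decide (c = ' ')) (List.takeWhile (fun c => !decide (c = ' ')) t ++ ' ' :: x)
      = List.takeWhile (fun c => !decide (c = ' ')) t := by
  rw [List.takeWhile_append_of_pos (fun y hy => List.mem_takeWhile_imp (p := fun c => !decide (c = ' ')) hy)]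
  simp

theorem pvIntercalateWdsSelfAux : ∀ (n : Nat), ∀ (cs : List Char), cs.length ≤ n →
    ¬ ([' ', ' '] <:+: cs) → cs.head? ≠ some ' ' → cs.getLast? ≠ some ' ' →
    [' '].intercalate (pvWds cs) = cs := by
  intro n
  induction n with
  | zero =>
    intro cs h _ _ _
    have : cs = [] := List.eq_nil_of_length_eq_zero (Nat.le_zero.mp h)
    subst this
    rw [show pvWds [] = [] from by rw [pvWds]]
    simp [List.intercalate]
  | succ n ih =>
    intro cs h hinf hh hl
    cases cs with
    | nil =>
      rw [show pvWds [] = [] from by rw [pvWds]]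
      simp [List.intercalate]
    | cons c t =>
      have hc : c ≠ ' ' := by intro h0; subst h0; exact hh rfl
      rw [pvWds_cons_of_ne c t hc]
      cases hd : t.dropWhile (· ≠ ' ') with
      | nil =>
        have htw : t.takeWhile (· ≠ ' ') = t := by
          conv_rhs => rw [← List.takeWhile_append_dropWhile (p := fun x => decide (x ≠ ' ')) (l := t)]
          rw [hd, List.append_nil]
        rw [show pvWds [] = [] from by rw [pvWds], htw]
        simp [List.intercalate]
      | cons d r =>
        have hne : t.dropWhile (· ≠ ' ') ≠ [] := by rw [hd]; simp
        have hds : d = ' ' := by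
          have h3 := List.head_dropWhile_not (· ≠ ' ') hne
          have h5 : (t.dropWhile (· ≠ ' ')).head? = some d := by rw [hd]; rfl
          have h4 := Option.some.inj ((List.head?_eq_head hne).symm.trans h5)
          rw [h4] at h3
          simpa using h3
        subst hds
        have hteq : t = t.takeWhile (· ≠ ' ') ++ ' ' :: r := by
          conv_lhs => rw [← List.takeWhile_append_dropWhile (p := fun x => decide (x ≠ ' ')) (l := t)]
          rw [hd]
        have hr : r ≠ [] := by
          intro h0
          subst h0
          apply hl
          rw [hteq, ← List.cons_append]
          exact List.getLast?_concat
        obtain ⟨e, r', rfl⟩ : ∃ e r', r = e :: r' := by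
          cases r with
          | nil => exact absurd rfl hr
          | cons e r' => exact ⟨e, r', rfl⟩
        have he : e ≠ ' ' := by
          intro h0
          subst h0
          apply hinf
          refine ⟨c :: t.takeWhile (· ≠ ' '), r', ?_⟩
          rw [hteq]
          simp [pvTakeWhileIdem]
        have hsuf : (e :: r') <:+: (c :: t) := by
          refine List.IsSuffix.isInfix ⟨c :: (t.takeWhile (· ≠ ' ') ++ [' ']), ?_⟩
          rw [hteq]
          simp [pvTakeWhileIdem]
        have hinf' : ¬ ([' ', ' '] <:+: (e :: r')) := fun hx => hinf (hx.trans hsuf)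
        have hh' : (e :: r').head? ≠ some ' ' := by simp [he]
        have hl' : (e :: r').getLast? ≠ some ' ' := by
          intro h0
          apply hl
          rw [hteq, show c :: (t.takeWhile (· ≠ ' ') ++ ' ' :: e :: r') =
            (c :: t.takeWhile (· ≠ ' ') ++ [' ']) ++ e :: r' from by simp]
          rw [List.getLast?_append, h0]
          rfl
        have hlen : (e :: r').length ≤ n := by
          have h6 := congrArg List.length hteq
          simp at h6 h ⊢
          omega
        rw [pvWds_cons_space]
        have hwne : pvWds (e :: r') ≠ [] := by
          rw [pvWds_cons_of_ne e r' he]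
          simp
        rw [pvIntercalateCons _ _ hwne, ih (e :: r') hlen hinf' hh' hl']
        rw [hteq]
        simp [pvTakeWhileIdem]

theorem pvIntercalateWdsSelf (cs : List Char) (hinf : ¬ ([' ', ' '] <:+: cs))
    (hh : cs.head? ≠ some ' ') (hl : cs.getLast? ≠ some ' ') :
    [' '].intercalate (pvWds cs) = cs := pvIntercalateWdsSelfAux cs.length cs le_rfl hinf hh hl

theorem pvNotInfixOfIsInFalse (s : String) (h : ¬ PySem.Str.isIn "  " s = true) :
    ¬ ([' ', ' '] <:+: s.toList) := by
  intro hx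
  apply h
  rw [PySem.Str.isIn_eq]
  exact (PySem.Chars.isIn_iff_infix (sub := "  ".toList) (s := s.toList)).mpr (by simpa using hx)

theorem pvCollapseAEq (n : Nat) : ∀ (s : String), s.toList.length ≤ n →
    s.toList.head? ≠ some ' ' → s.toList.getLast? ≠ some ' ' →
    pvCollapseA s = String.ofList ([' '].intercalate (pvWds s.toList)) := by
  induction n with
  | zero =>
    intro s h hh hl
    have hsl : s.toList = [] := List.eq_nil_of_length_eq_zero (Nat.le_zero.mp h)
    rw [pvCollapseA]
    have hin : ¬ PySem.Str.isIn "  " s = true := by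
      intro hx
      have := (PySem.Chars.isIn_iff_infix (sub := "  ".toList) (s := s.toList)).mp (by rw [← PySem.Str.isIn_eq]; exact hx)
      rw [hsl] at this
      have := this.length_le
      simp at this
    rw [if_neg hin, hsl]
    rw [show pvWds [] = [] from by rw [pvWds]]
    rw [show [' '].intercalate [] = [] by simp [List.intercalate]]
    rw [← String.ofList_toList (s := s), hsl]
  | succ n ih =>
    intro s h hh hl
    rw [pvCollapseA]
    by_cases hin : PySem.Str.isIn "  " s = true
    · rw [if_pos hin]
      have hrep := pvReplaceEqRep s
      have hlen : (PySem.Str.replace s "  " " ").toList.length ≤ n := by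
        have := pvReplaceLenLt s hin
        omega
      have hh' : (PySem.Str.replace s "  " " ").toList.head? ≠ some ' ' := by
        rw [hrep, pvRepHead]
        exact hh
      have hl' : (PySem.Str.replace s "  " " ").toList.getLast? ≠ some ' ' := by
        rw [hrep]
        exact pvRepLast _ hl
      rw [ih _ hlen hh' hl']
      rw [hrep, pvWdsRep]
    · rw [if_neg hin]
      rw [pvIntercalateWdsSelf s.toList (pvNotInfixOfIsInFalse s hin) hh hl]
      exact (String.ofList_toList).symm

theorem pvDropWhileHeadNotSpace (y : List Char) :
    (y.dropWhile PySem.Chars.isspace).head? ≠ some ' ' := by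
  cases hdw : y.dropWhile PySem.Chars.isspace with
  | nil => simp
  | cons a w =>
    simp only [List.head?_cons]
    intro h0
    have ha : a = ' ' := Option.some.inj h0
    have hne : y.dropWhile PySem.Chars.isspace ≠ [] := by rw [hdw]; simp
    have h3 := List.head_dropWhile_not PySem.Chars.isspace hne
    have h5 : (y.dropWhile PySem.Chars.isspace).head? = some a := by rw [hdw]; rfl
    have h4 := Option.some.inj ((List.head?_eq_head hne).symm.trans h5)
    rw [h4, ha] at h3
    exact absurd h3 (by decide)

theorem pvStripHead (cs : List Char) : (PySem.Chars.strip cs).head? ≠ some ' ' := by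
  rw [PySem.Chars.strip, PySem.Chars.rstrip, List.head?_reverse]
  cases hdw : (PySem.Chars.lstrip cs).reverse.dropWhile PySem.Chars.isspace with
  | nil => simp
  | cons a w =>
    obtain ⟨pre, hpre⟩ := List.dropWhile_suffix (l := (PySem.Chars.lstrip cs).reverse) PySem.Chars.isspace
    rw [hdw] at hpre
    have hsome : ∃ b, (a :: w).getLast? = some b := by
      have := List.getLast?_isSome (l := a :: w)
      simp at this
      exact Option.isSome_iff_exists.mp (by simp [this])
    obtain ⟨b, hb⟩ := hsome
    have heq : (a :: w).getLast? = (PySem.Chars.lstrip cs).reverse.getLast? := by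
      rw [← hpre, List.getLast?_append, hb]
      rfl
    rw [heq, List.getLast?_reverse]
    exact pvDropWhileHeadNotSpace cs

theorem pvStripLast (cs : List Char) : (PySem.Chars.strip cs).getLast? ≠ some ' ' := by
  rw [PySem.Chars.strip, PySem.Chars.rstrip, List.getLast?_reverse]
  exact pvDropWhileHeadNotSpace _

-- ===== VERDICT (by name: the statement is the Claim_ definition above) =====
theorem pvStringEqOfToList (a b : String) (h : a.toList = b.toList) : a = b := by
  rw [← String.ofList_toList (s := a), h, String.ofList_toList]

theorem construir_tipo_producto_spec : Claim_equal_construir_tipo_producto := by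
  unfold Claim_equal_construir_tipo_producto
  intro nombre largo ancho _
  unfold Spec_construir_tipo_producto construir_tipo_producto construir_tipo_producto_alt
  dsimp only
  set tipo := PySem.Str.strip (String.ofList ((pvClean nombre).toList ++ ' ' :: (pvClean largo).toList ++ ' ' :: (pvClean ancho).toList)) with htipo
  have hh : tipo.toList.head? ≠ some ' ' := by
    rw [htipo, PySem.Str.toList_strip]
    exact pvStripHead _
  have hl : tipo.toList.getLast? ≠ some ' ' := by
    rw [htipo, PySem.Str.toList_strip]
    exact pvStripLast _
  rw [pvCollapseAEq tipo.toList.length tipo le_rfl hh hl]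
  have hsplit : PySem.Str.split? tipo " " = some (List.map String.ofList (pvSp tipo.toList)) := by
    rw [PySem.Str.split?, PySem.Chars.split?, if_neg (by simp)]
    rw [show " ".toList = [' '] from rfl, pvSplitOnEqSp]
    rfl
  rw [hsplit, Option.getD_some]
  rw [List.filter_map]
  have hcomp : ((fun p => !(p == "")) ∘ String.ofList) = fun cs : List Char => decide (cs ≠ []) := by
    funext cs
    show (!(String.ofList cs == "")) = decide (cs ≠ [])
    by_cases hcs : cs = []
    · subst hcs
      simp
    · have h1 : String.ofList cs ≠ "" := by
        intro h0
        apply hcs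
        have := congrArg String.toList h0
        simpa using this
      simp [h1, hcs]
  rw [hcomp]
  rw [show (List.filter (fun cs : List Char => decide (cs ≠ [])) (pvSp tipo.toList)) = pvWds tipo.toList from pvFilterSp tipo.toList]
  apply pvStringEqOfToList
  rw [String.toList_ofList, PySem.Str.toList_join]
  rw [List.map_map]
  rw [show String.toList ∘ String.ofList = id from funext (fun l => String.toList_ofList)]
  rw [List.map_id]
  rfl
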